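-- pv_equiv track=rewrite | github.com/DJWrenhouse/distributor-dataset-generator | data_generator/generate_preview.py | _parse_tables
-- ===== SOURCE A (Python) =====
-- TABLES = [
--     "vendors",
--     "vendor_performance",
--     "vendor_item_details",
--     "distribution_centers",
--     "customers",
--     "items",
--     "item_costs",
--     "item_forecast",
--     "inventory",
--     "inventory_monthly_snapshot",
--     "inventory_adjustments",
--     "dc_item_slotting",
--     "carriers",
--     "driver_costs",
--     "fuel_costs",
--     "orders",
--     "order_lines",
--     "shipments",
--     "shipment_lines",
--     "tracking_events",
--     "customer_item_preferences",
--     "backorders",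
--     "invoices",
--     "ar_ledger",
--     "returns",
--     "purchase_orders",
--     "price_history",
--     "promotions",
--     "promo_orders",
--     "labor_costs",
--     "sales_reps",
--     "customer_contacts",
-- ]
--
-- def _parse_tables(values):
--     """Parse and validate table names from CLI arguments.
--
--     Args:
--         values: List of comma-separated or individual table names.
--
--     Returns:
--         list: Sorted, deduplicated list of valid table names.
--     """
--     if not values:
--         return TABLES
--     tables = []
--     for v in values:
--         parts = [p.strip() for p in v.split(",") if p.strip()]
--         tables.extend(parts)
--     tables = [t for t in tables if t in TABLES]
--     return sorted(set(tables), key=TABLES.index)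
-- ===== SOURCE B (Python) =====
-- TABLES = [
--     "vendors",
--     "vendor_performance",
--     "vendor_item_details",
--     "distribution_centers",
--     "customers",
--     "items",
--     "item_costs",
--     "item_forecast",
--     "inventory",
--     "inventory_monthly_snapshot",
--     "inventory_adjustments",
--     "dc_item_slotting",
--     "carriers",
--     "driver_costs",
--     "fuel_costs",
--     "orders",
--     "order_lines",
--     "shipments",
--     "shipment_lines",
--     "tracking_events",
--     "customer_item_preferences",
--     "backorders",
--     "invoices",
--     "ar_ledger",
--     "returns",
--     "purchase_orders",
--     "price_history",
--     "promotions",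
--     "promo_orders",
--     "labor_costs",
--     "sales_reps",
--     "customer_contacts",
-- ]
--
--
-- def _parse_tables(values):
--     """Parse and validate table names from CLI arguments."""
--     if not values:
--         return TABLES
--     wanted = set()
--     for v in values:
--         for p in v.split(","):
--             t = p.strip()
--             if t:
--                 wanted.add(t)
--     return [t for t in TABLES if t in wanted]
-- ===== Notes on version B (the rewrite author's own statement) =====
-- stated objective: idiomatic
-- what changed: Instead of filtering the parsed names against TABLES and then sorting their set with key=TABLES.index (a linear list scan per key), B collects the parsed names into a set once and emits the valid ones in one ordered pass over TABLES, so the sort call and all index scans disappear.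
import Mathlib
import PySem

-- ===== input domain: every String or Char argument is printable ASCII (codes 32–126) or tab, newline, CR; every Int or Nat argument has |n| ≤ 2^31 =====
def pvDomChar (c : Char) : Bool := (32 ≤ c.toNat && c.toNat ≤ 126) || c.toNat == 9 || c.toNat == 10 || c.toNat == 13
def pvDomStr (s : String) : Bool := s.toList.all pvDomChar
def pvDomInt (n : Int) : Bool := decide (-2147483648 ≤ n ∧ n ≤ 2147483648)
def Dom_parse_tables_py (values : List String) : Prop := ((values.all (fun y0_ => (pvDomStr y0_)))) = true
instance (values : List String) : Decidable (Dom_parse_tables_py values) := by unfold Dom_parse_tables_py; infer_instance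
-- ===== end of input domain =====

-- B replaces A's filter + sorted(set(...), key=TABLES.index) by one ordered pass over TABLES
-- against a set of the parsed names (idiomatic; same return value, no sort call).

def TABLES : List String := [
  "vendors", "vendor_performance", "vendor_item_details", "distribution_centers",
  "customers", "items", "item_costs", "item_forecast", "inventory",
  "inventory_monthly_snapshot", "inventory_adjustments", "dc_item_slotting",
  "carriers", "driver_costs", "fuel_costs", "orders", "order_lines", "shipments",
  "shipment_lines", "tracking_events", "customer_item_preferences", "backorders",
  "invoices", "ar_ledger", "returns", "purchase_orders", "price_history",
  "promotions", "promo_orders", "labor_costs", "sales_reps", "customer_contacts"]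

-- v.split(","): sep is the nonempty literal ",", so PySem.Str.split? is always some (exact)
def pySplitComma (v : String) : List String := (PySem.Str.split? v ",").getD []

-- ===== PORT A =====
-- key=TABLES.index: exact here because every sorted element was filtered to be in TABLES,
-- so index? is always some (the .getD 0 default is never used).
def parse_tables_py (values : List String) : List String :=
  if values = [] then TABLES
  else
    let tables : List String := values.foldl (fun acc v =>
      acc ++ (((pySplitComma v).filter
        (fun p => PySem.Str.strip p ≠ "")).map PySem.Str.strip)) []
    let tables2 : List String := tables.filter (fun t => TABLES.contains t)
    PySem.List.sorted (PySem.Set.ofList tables2)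
      (fun t => (PySem.List.index? TABLES t).getD 0) false

-- ===== PORT B =====
def parse_tables_py_alt (values : List String) : List String :=
  if values = [] then TABLES
  else
    let wanted : PySem.Set String := values.foldl (fun s v =>
      (pySplitComma v).foldl (fun s p =>
        let t := PySem.Str.strip p
        if t ≠ "" then PySem.Set.add s t else s) s) PySem.Set.empty
    TABLES.filter (fun t => PySem.Set.contains wanted t)

-- ===== PRECONDITION & SPEC =====
def Spec_parse_tables_py (values : List String) (out : List String) : Prop := out = parse_tables_py_alt values
instance (values : List String) (out : List String) : Decidable (Spec_parse_tables_py values out) := by unfold Spec_parse_tables_py; infer_instance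

-- ===== CLAIM (what is proved, stated in full; the proofs are below) =====
def Claim_equal_parse_tables_py : Prop := ∀ (values : List String), Dom_parse_tables_py values → Spec_parse_tables_py values (parse_tables_py values)

-- ===== LEMMAS AND PROOFS =====

-- B's inner conditional fold of Set.add is the fold of Set.add over A's filtered-and-stripped parts.
theorem inner_fold_eq (ps : List String) (s : PySem.Set String) :
    ps.foldl (fun s p => let t := PySem.Str.strip p;
        if t ≠ "" then PySem.Set.add s t else s) s
      = ((ps.filter (fun p => PySem.Str.strip p ≠ "")).map PySem.Str.strip).foldl
          PySem.Set.add s := by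
  induction ps generalizing s with
  | nil => rfl
  | cons p ps ih =>
    by_cases h : PySem.Str.strip p = ""
    · rw [List.filter_cons_of_neg (by simp [h]), List.foldl_cons]
      have hstep : (let t := PySem.Str.strip p;
          if t ≠ "" then PySem.Set.add s t else s) = s := by simp [h]
      rw [hstep]; exact ih s
    · rw [List.filter_cons_of_pos (by simp [h]), List.map_cons, List.foldl_cons,
        List.foldl_cons]
      have hstep : (let t := PySem.Str.strip p;
          if t ≠ "" then PySem.Set.add s t else s)
          = PySem.Set.add s (PySem.Str.strip p) := by simp [h]
      rw [hstep]; exact ih _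
-- B's set is the fold of Set.add over A's flat parsed list.
theorem wanted_eq (values : List String) (s : PySem.Set String) :
    values.foldl (fun s v =>
        (pySplitComma v).foldl (fun s p => let t := PySem.Str.strip p;
          if t ≠ "" then PySem.Set.add s t else s) s) s
      = (values.foldl (fun acc v =>
          acc ++ (((pySplitComma v).filter
            (fun p => PySem.Str.strip p ≠ "")).map PySem.Str.strip)) []).foldl
          PySem.Set.add s := by
  induction values generalizing s with
  | nil => rfl
  | cons v vs ih =>
    rw [List.foldl_cons, inner_fold_eq, ih,
      PySem.List.foldl_append_eq_flatMap, PySem.List.foldl_append_eq_flatMap,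
      List.nil_append, List.nil_append, List.flatMap_cons, List.foldl_append]

theorem tables_nodup : TABLES.Nodup := by decide

theorem tables_pairwise_index :
    TABLES.Pairwise (fun a b =>
      (PySem.List.index? TABLES a).getD 0 < (PySem.List.index? TABLES b).getD 0) := by
  decide

theorem parse_tables_py_spec : Claim_equal_parse_tables_py := by
  intro values _
  unfold Spec_parse_tables_py parse_tables_py parse_tables_py_alt
  by_cases hv : values = []
  · simp [hv]
  · simp only [hv, if_false]
    rw [wanted_eq, show (PySem.Set.empty : PySem.Set String) = [] from rfl,
      ← PySem.Set.ofList_eq_foldl]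
    apply PySem.List.sorted_eq_of_perm_of_pairwise_lt
    · rw [List.perm_ext_iff_of_nodup
        (List.Nodup.filter _ tables_nodup) (PySem.Set.nodup_ofList _)]
      intro x
      simp only [List.mem_filter, PySem.Set.mem_ofList, PySem.Set.contains,
        List.contains_iff_mem]
      tauto
    · exact tables_pairwise_index.sublist List.filter_sublist
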